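-- pv_equiv track=rewrite | github.com/eamtcPROG/CS | Lab1/main.py | generate_shifted_alphabet
-- ===== SOURCE A (Python) =====
-- ALPHABET = "ABCDEFGHIJKLMNOPQRSTUVWXYZ"
--
-- def generate_shifted_alphabet(key2):
--     unique_chars = ""
--     for char in key2:
--         if char not in unique_chars:
--             unique_chars += char
--
--     shifted = unique_chars
--     for char in ALPHABET:
--         if char not in unique_chars:
--             shifted += char
--
--     return shifted
-- ===== SOURCE B (Python) =====
-- ALPHABET = "ABCDEFGHIJKLMNOPQRSTUVWXYZ"
--
-- def generate_shifted_alphabet(key2):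
--     # keep each char of key2 only at its first-occurrence index (no growing accumulator)
--     head = "".join(c for i, c in enumerate(key2) if key2.index(c) == i)
--     # remaining alphabet letters: set difference, restored to order by sorting
--     tail = "".join(sorted(set(ALPHABET) - set(key2)))
--     return head + tail
-- ===== Notes on version B (the rewrite author's own statement) =====
-- stated objective: alternative
-- what changed: Replaces A's two accumulator loops (growing unique-string with membership tests, then an alphabet scan against it) by an index-based filter that keeps each key2 char only at its first-occurrence index, plus a set difference set(ALPHABET)-set(key2) restored to alphabetical order by sorting.
import Mathlib
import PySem

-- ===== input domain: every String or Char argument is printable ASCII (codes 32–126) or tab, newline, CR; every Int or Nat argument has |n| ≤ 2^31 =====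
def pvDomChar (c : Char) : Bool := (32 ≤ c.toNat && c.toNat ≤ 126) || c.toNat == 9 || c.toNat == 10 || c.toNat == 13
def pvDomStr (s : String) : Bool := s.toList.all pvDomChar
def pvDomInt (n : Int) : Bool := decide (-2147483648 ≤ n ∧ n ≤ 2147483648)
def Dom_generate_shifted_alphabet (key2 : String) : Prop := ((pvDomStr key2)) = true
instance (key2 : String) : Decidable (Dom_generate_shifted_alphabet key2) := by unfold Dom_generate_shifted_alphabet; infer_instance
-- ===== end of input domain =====

-- B replaces A's two accumulator loops by an index-based filter (keep key2[i] iff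
-- its first occurrence is at i) plus a sorted set difference for the remaining letters.

def pvAlphabet : List Char := "ABCDEFGHIJKLMNOPQRSTUVWXYZ".toList

-- ===== PORT A =====
def generate_shifted_alphabet (key2 : String) : String :=
  -- first loop: unique_chars accumulates first occurrences of key2's chars
  let unique := key2.toList.foldl
    (fun acc c => if acc.contains c then acc else acc ++ [c]) ([] : List Char)
  -- second loop: append alphabet chars not in unique_chars
  let shifted := pvAlphabet.foldl
    (fun acc c => if unique.contains c then acc else acc ++ [c]) unique
  String.ofList shifted

-- ===== PORT B =====
-- the filter test of B's head: 'key2.index(c) == i' (index as Python int)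
def pvPred (full : List Char) (p : Int × Char) : Bool :=
  (PySem.List.index? full p.2).map (fun k => (k : Int)) == some p.1

def generate_shifted_alphabet_alt (key2 : String) : String :=
  let ks := key2.toList
  -- ''.join(c for i, c in enumerate(key2) if key2.index(c) == i)
  let head := ((PySem.List.enumerate ks).filter (pvPred ks)).map Prod.snd
  -- ''.join(sorted(set(ALPHABET) - set(key2)))
  let tail := PySem.List.sorted (PySem.Set.diff (PySem.Set.ofList pvAlphabet) ks) (fun c => c)
  String.ofList (head ++ tail)

-- ===== PRECONDITION & SPEC =====
def Spec_generate_shifted_alphabet (key2 : String) (out : String) : Prop := out = generate_shifted_alphabet_alt key2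
instance (key2 : String) (out : String) : Decidable (Spec_generate_shifted_alphabet key2 out) := by unfold Spec_generate_shifted_alphabet; infer_instance

-- ===== CLAIM (what is proved, stated in full; the proofs are below) =====
def Claim_equal_generate_shifted_alphabet : Prop := ∀ (key2 : String), Dom_generate_shifted_alphabet key2 → Spec_generate_shifted_alphabet key2 (generate_shifted_alphabet key2)

-- ===== LEMMAS AND PROOFS =====

theorem pvOfList_snoc (pre : List Char) (a : Char) :
    PySem.Set.ofList (pre ++ [a])
      = if a ∈ pre then PySem.Set.ofList pre else PySem.Set.ofList pre ++ [a] := by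
  rw [PySem.Set.ofList_eq_foldl (pre ++ [a]), List.foldl_append, ← PySem.Set.ofList_eq_foldl]
  by_cases h : a ∈ pre
  · simp [PySem.Set.add, PySem.Set.contains, PySem.Set.mem_ofList, h]
  · simp [PySem.Set.add, PySem.Set.contains, PySem.Set.mem_ofList, h]

-- A's dedup loop with seen-prefix `pre` = B's first-occurrence-index filter on the suffix
theorem pvHead (l : List Char) : ∀ (pre : List Char),
    l.foldl PySem.Set.add (PySem.Set.ofList pre)
      = PySem.Set.ofList pre
        ++ ((PySem.List.enumerate l (pre.length : Int)).filter (pvPred (pre ++ l))).map Prod.snd := by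
  induction l with
  | nil => intro pre; simp [PySem.List.enumerate]
  | cons a l ih =>
    intro pre
    have hsnoc : PySem.Set.add (PySem.Set.ofList pre) a = PySem.Set.ofList (pre ++ [a]) := by
      rw [PySem.Set.ofList_eq_foldl (pre ++ [a]), List.foldl_append, ← PySem.Set.ofList_eq_foldl]
      rfl
    have hfull : pre ++ a :: l = (pre ++ [a]) ++ l := by simp
    have hcast : (pre.length : Int) + 1 = ((pre ++ [a]).length : Int) := by
      simp
    rw [List.foldl_cons, hsnoc, ih (pre ++ [a]),
        PySem.List.enumerate_cons, hfull, hcast, List.filter_cons]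
    by_cases h : a ∈ pre
    · -- a already seen: head pair is dropped, ofList (pre ++ [a]) = ofList pre
      have hidx : PySem.List.index? ((pre ++ [a]) ++ l) a = PySem.List.index? pre a := by
        rw [show (pre ++ [a]) ++ l = pre ++ ([a] ++ l) by simp]
        exact PySem.List.index?_append_of_mem _ h
      cases hk : PySem.List.index? pre a with
      | none => exact absurd ((PySem.List.index?_eq_none_iff pre a).mp hk) (by simpa using h)
      | some k =>
        obtain ⟨hklt, -, -⟩ := PySem.List.getElem_of_index?_eq_some hk
        have hpred : pvPred ((pre ++ [a]) ++ l) ((pre.length : Int), a) = false := by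
          show ((PySem.List.index? ((pre ++ [a]) ++ l) a).map (fun k => (k : Int))
              == some ((pre.length : Nat) : Int)) = false
          rw [hidx, hk]
          simp
          omega
        rw [hpred, pvOfList_snoc, if_pos h]
        simp
    · -- a new: head pair is kept
      have hidx : PySem.List.index? ((pre ++ [a]) ++ l) a = some pre.length := by
        rw [PySem.List.index?_append_of_mem _ (by simp : a ∈ pre ++ [a])]
        exact PySem.List.index?_append_singleton_self pre a h
      have hpred : pvPred ((pre ++ [a]) ++ l) ((pre.length : Int), a) = true := by
        show ((PySem.List.index? ((pre ++ [a]) ++ l) a).map (fun k => (k : Int))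
            == some ((pre.length : Nat) : Int)) = true
        rw [hidx]
        simp
      rw [hpred, pvOfList_snoc, if_neg h]
      simp

theorem pvAlphabet_pairwise : pvAlphabet.Pairwise (· < ·) := by decide

theorem pvOfList_alphabet : PySem.Set.ofList pvAlphabet = pvAlphabet := by decide

theorem pvContains_ofList (xs : List Char) (c : Char) :
    (PySem.Set.ofList xs).contains c = xs.contains c := by
  by_cases h : c ∈ xs <;> simp [h, PySem.Set.mem_ofList]

-- ===== VERDICT (by name: the statement is the Claim_ definition above) =====
theorem generate_shifted_alphabet_spec : Claim_equal_generate_shifted_alphabet := by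
  intro key2 _
  show _ = _
  simp only [generate_shifted_alphabet, generate_shifted_alphabet_alt]
  apply congrArg String.ofList
  -- A's first loop is folding Set.add
  have hstep : (fun (acc : List Char) c => if acc.contains c then acc else acc ++ [c])
      = PySem.Set.add := by
    funext acc c; simp [PySem.Set.add, PySem.Set.contains]
  rw [hstep, ← PySem.Set.ofList_eq_foldl]
  -- A's second loop appends the filtered alphabet
  have hAside : pvAlphabet.foldl
      (fun acc c => if (PySem.Set.ofList key2.toList).contains c then acc else acc ++ [c])
      (PySem.Set.ofList key2.toList)
      = PySem.Set.ofList key2.toList ++ pvAlphabet.filter (fun c => !key2.toList.contains c) := by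
    have hfun : (fun (acc : List Char) c =>
        if (PySem.Set.ofList key2.toList).contains c then acc else acc ++ [c])
        = fun acc c => if (!key2.toList.contains c) then acc ++ [c] else acc := by
      funext acc c
      rw [pvContains_ofList]
      cases key2.toList.contains c
      · simp
      · simp
    rw [hfun, PySem.List.foldl_append_if_eq_filter]
  -- B's head is A's first loop
  have hheadEq : ((PySem.List.enumerate key2.toList).filter (pvPred key2.toList)).map Prod.snd
      = PySem.Set.ofList key2.toList := by
    have h := pvHead key2.toList []
    simp only [List.nil_append, List.length_nil, Nat.cast_zero] at h
    rw [PySem.Set.ofList_eq_foldl key2.toList]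
    simpa [PySem.Set.ofList] using h.symm
  -- B's tail: sorting the already strictly increasing set difference is the identity
  have htail : PySem.List.sorted (PySem.Set.diff (PySem.Set.ofList pvAlphabet) key2.toList) (fun c => c)
      = pvAlphabet.filter (fun c => !key2.toList.contains c) := by
    have hdiff : PySem.Set.diff (PySem.Set.ofList pvAlphabet) key2.toList
        = pvAlphabet.filter (fun c => !key2.toList.contains c) := by
      rw [pvOfList_alphabet]; rfl
    rw [hdiff]
    exact PySem.List.sorted_eq_of_perm_of_pairwise_lt _ _ _ (List.Perm.refl _)
      (List.Pairwise.filter _ pvAlphabet_pairwise)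
  rw [hheadEq, htail]
  exact hAside
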